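-- pv_equiv track=rewrite | github.com/entechlog/homelab-examples | immich/windows/src/detect_duplicates.py | select_asset_to_keep
-- ===== SOURCE A (Python) =====
-- from typing import Dict, List, Tuple
--
-- def select_asset_to_keep(assets: List[Dict], root_paths: List[str]) -> Dict:
--     """
--     Select which asset to keep from a group of duplicates.
--
--     Priority:
--     1. Assets in configured root paths (external library)
--     2. Assets with earliest creation date
--     3. First asset in list
--
--     Args:
--         assets: List of duplicate assets
--         root_paths: Configured root paths for external library
--
--     Returns:
--         The asset to keep
--     """
--     # Prefer assets in root paths
--     for asset in assets:
--         path = asset.get("originalPath", "")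
--         for root in root_paths:
--             if path.startswith(root):
--                 return asset
--
--     # Fall back to earliest creation date
--     sorted_assets = sorted(
--         assets,
--         key=lambda a: a.get("fileCreatedAt", "") or a.get("createdAt", ""),
--     )
--     return sorted_assets[0]
-- ===== SOURCE B (Python) =====
-- from typing import Dict, List
--
--
-- def select_asset_to_keep(assets: List[Dict], root_paths: List[str]) -> Dict:
--     """Single pass: return the first asset under a configured root path;
--     otherwise track the earliest-created asset (first one wins ties)."""
--     best = None  # (sort key, asset) of the best fallback candidate so far
--     for asset in assets:
--         path = asset.get("originalPath", "")
--         if any(path.startswith(root) for root in root_paths):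
--             return asset
--         key = asset.get("fileCreatedAt", "") or asset.get("createdAt", "")
--         if best is None or key < best[0]:
--             best = (key, asset)
--     return best[1]
-- ===== Notes on version B (the rewrite author's own statement) =====
-- stated objective: alternative
-- what changed: Replaces A's two passes (prefix scan, then a full sort just to take element 0) with one loop that returns the first root-path match immediately and otherwise tracks a single running minimum with strict <, preserving first-occurrence tie-breaking.
import Mathlib
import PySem

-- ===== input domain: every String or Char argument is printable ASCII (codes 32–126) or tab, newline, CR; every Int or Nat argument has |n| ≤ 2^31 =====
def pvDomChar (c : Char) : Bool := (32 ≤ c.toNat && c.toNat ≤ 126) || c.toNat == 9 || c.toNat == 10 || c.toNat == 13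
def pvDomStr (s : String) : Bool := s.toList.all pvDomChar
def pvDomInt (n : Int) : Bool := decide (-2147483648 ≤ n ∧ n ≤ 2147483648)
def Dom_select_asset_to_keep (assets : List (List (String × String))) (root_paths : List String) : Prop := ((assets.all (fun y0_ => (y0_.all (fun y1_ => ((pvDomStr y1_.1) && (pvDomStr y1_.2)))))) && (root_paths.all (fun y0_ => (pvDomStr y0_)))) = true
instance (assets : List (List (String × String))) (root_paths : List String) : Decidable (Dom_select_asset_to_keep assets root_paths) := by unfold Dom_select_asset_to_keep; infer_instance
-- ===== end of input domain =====

-- B replaces A's two passes (prefix scan, then a sort used only for its first element)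
-- with one loop that returns the first root-path match and otherwise tracks a running minimum.

-- ===== PORT A =====
-- key=lambda a: a.get("fileCreatedAt", "") or a.get("createdAt", "")
def pvKeyA (a : List (String × String)) : String :=
  let v := (PySem.Dict.mk a).getD "fileCreatedAt" ""
  if v = "" then (PySem.Dict.mk a).getD "createdAt" "" else v

-- the first 'for asset in assets: for root in root_paths: if path.startswith(root): return asset' pass
def pvFirstRoot (root_paths : List String) : List (List (String × String)) → Option (List (String × String))
  | [] => none
  | a :: rest =>
    let path := (PySem.Dict.mk a).getD "originalPath" ""
    if root_paths.any (fun r => PySem.Str.startswith path r) then some a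
    else pvFirstRoot root_paths rest

def select_asset_to_keep (assets : List (List (String × String))) (root_paths : List String) : List (String × String) :=
  match pvFirstRoot root_paths assets with
  | some a => a
  | none =>
    -- sorted_assets[0]; Python raises IndexError on empty assets (outside Pre_)
    match PySem.List.pyGet? (PySem.List.sorted assets pvKeyA false) 0 with
    | some a => a
    | none => []

-- ===== PORT B =====
-- the single 'for asset in assets' loop of Source B, carrying 'best' ((key, asset) or None)
def pvAltGo (root_paths : List String) (best : Option (String × List (String × String))) :
    List (List (String × String)) → List (String × String)
  | [] =>
    -- 'return best[1]'; Python raises on empty assets (best is None, outside Pre_)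
    match best with
    | some kb => kb.2
    | none => []
  | a :: rest =>
    let path := (PySem.Dict.mk a).getD "originalPath" ""
    if root_paths.any (fun r => PySem.Str.startswith path r) then a
    else
      let k := pvKeyA a
      match best with
      | none => pvAltGo root_paths (some (k, a)) rest
      | some (bk, ba) =>
        if k < bk then pvAltGo root_paths (some (k, a)) rest
        else pvAltGo root_paths (some (bk, ba)) rest

def select_asset_to_keep_alt (assets : List (List (String × String))) (root_paths : List String) : List (String × String) :=
  pvAltGo root_paths none assets

-- ===== PRECONDITION & SPEC =====
-- Pre_ excludes only assets = [], on which A raises IndexError (sorted([])[0]) and B raises TypeError.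
def Pre_select_asset_to_keep (assets : List (List (String × String))) (root_paths : List String) : Prop :=
  assets ≠ []
instance (assets : List (List (String × String))) (root_paths : List String) : Decidable (Pre_select_asset_to_keep assets root_paths) := by unfold Pre_select_asset_to_keep; infer_instance

def pvWitness_select_asset_to_keep : (List (List (String × String))) × List String :=
  ([[("originalPath", "/a/x.jpg"), ("createdAt", "2020")]], ["/a"])

def Spec_select_asset_to_keep (assets : List (List (String × String))) (root_paths : List String) (out : List (String × String)) : Prop := out = select_asset_to_keep_alt assets root_paths
instance (assets : List (List (String × String))) (root_paths : List String) (out : List (String × String)) : Decidable (Spec_select_asset_to_keep assets root_paths out) := by unfold Spec_select_asset_to_keep; infer_instance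

-- ===== CLAIM (what is proved, stated in full; the proofs are below) =====
def Claim_equal_select_asset_to_keep : Prop := ∀ (assets : List (List (String × String))) (root_paths : List String), Dom_select_asset_to_keep assets root_paths → Pre_select_asset_to_keep assets root_paths → Spec_select_asset_to_keep assets root_paths (select_asset_to_keep assets root_paths)

-- ===== LEMMAS AND PROOFS =====

-- running minimum over a list, seeded with b (first occurrence wins ties)
def pvFBest (b : List (String × String)) : List (List (String × String)) → List (String × String)
  | [] => b
  | x :: xs => pvFBest (if pvKeyA x < pvKeyA b then x else b) xs

-- the insertion-sort fold keeps pvFBest at the head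
lemma pv_foldl_ins_head (xs : List (List (String × String))) :
    ∀ (h : List (String × String)) (t : List (List (String × String))),
    ∃ t', xs.foldl (fun acc x => PySem.List.insertBy (fun a b => decide (pvKeyA a < pvKeyA b)) x acc) (h :: t)
          = pvFBest h xs :: t' := by
  induction xs with
  | nil => intro h t; exact ⟨t, rfl⟩
  | cons x xs ih =>
    intro h t
    simp only [List.foldl_cons, PySem.List.insertBy, pvFBest]
    by_cases hx : pvKeyA x < pvKeyA h
    · simpa [hx] using ih x (h :: t)
    · simpa [hx] using ih h (PySem.List.insertBy (fun a b => decide (pvKeyA a < pvKeyA b)) x t)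

lemma pv_sorted_head (a0 : List (String × String)) (rest : List (List (String × String))) :
    ∃ t', PySem.List.sorted (a0 :: rest) pvKeyA false = pvFBest a0 rest :: t' := by
  rw [PySem.List.sorted_eq_foldl_insertBy]
  simpa [PySem.List.insertBy] using pv_foldl_ins_head rest a0 []

-- if A's first pass hits, B's loop returns the same asset whatever 'best' it carries
lemma pv_altGo_of_firstRoot_some (root_paths : List String) :
    ∀ (xs : List (List (String × String))) (a : List (String × String)),
    pvFirstRoot root_paths xs = some a →
    ∀ best, pvAltGo root_paths best xs = a := by
  intro xs
  induction xs with
  | nil => intro a h best; simp [pvFirstRoot] at h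
  | cons x xs ih =>
    intro a h best
    simp only [pvFirstRoot] at h
    simp only [pvAltGo]
    by_cases hm : root_paths.any (fun r => PySem.Str.startswith ((PySem.Dict.mk x).getD "originalPath" "") r) = true
    · simp only [hm, if_pos] at h ⊢; exact Option.some.inj h
    · simp only [hm] at h ⊢
      cases best with
      | none => exact ih a h _
      | some kb => cases kb with
        | mk bk ba =>
          by_cases hk : pvKeyA x < bk
          · simp only [hk, if_pos]; exact ih a h _
          · simp only [hk, ite_false]; exact ih a h _

-- if A's first pass misses, no element matches
lemma pv_firstRoot_none (root_paths : List String) :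
    ∀ (xs : List (List (String × String))),
    pvFirstRoot root_paths xs = none →
    ∀ a ∈ xs, root_paths.any (fun r => PySem.Str.startswith ((PySem.Dict.mk a).getD "originalPath" "") r) = false := by
  intro xs
  induction xs with
  | nil => intro _ a ha; simp at ha
  | cons x xs ih =>
    intro h a ha
    simp only [pvFirstRoot] at h
    by_cases hm : root_paths.any (fun r => PySem.Str.startswith ((PySem.Dict.mk x).getD "originalPath" "") r) = true
    · rw [if_pos hm] at h; simp at h
    · rw [if_neg hm] at h
      rcases List.mem_cons.mp ha with rfl | ha'
      · simpa using hm
      · exact ih h a ha'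

-- with no matches, B's loop computes the running minimum
lemma pv_altGo_fbest (root_paths : List String) :
    ∀ (xs : List (List (String × String))) (b : List (String × String)),
    (∀ a ∈ xs, root_paths.any (fun r => PySem.Str.startswith ((PySem.Dict.mk a).getD "originalPath" "") r) = false) →
    pvAltGo root_paths (some (pvKeyA b, b)) xs = pvFBest b xs := by
  intro xs
  induction xs with
  | nil => intro b _; rfl
  | cons x xs ih =>
    intro b hnm
    have hx := hnm x (List.mem_cons_self ..)
    simp only [pvAltGo, pvFBest, hx, Bool.false_eq_true, if_false]
    by_cases hk : pvKeyA x < pvKeyA b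
    · simp only [hk, if_pos]
      exact ih x (fun a ha => hnm a (List.mem_cons_of_mem _ ha))
    · simp only [hk, if_false]
      exact ih b (fun a ha => hnm a (List.mem_cons_of_mem _ ha))

-- ===== VERDICT (by name: the statement is the Claim_ definition above) =====
theorem select_asset_to_keep_spec : Claim_equal_select_asset_to_keep := by
  intro assets root_paths _ hpre
  unfold Spec_select_asset_to_keep select_asset_to_keep select_asset_to_keep_alt
  cases hfr : pvFirstRoot root_paths assets with
  | some a => rw [pv_altGo_of_firstRoot_some root_paths assets a hfr none]
  | none =>
    cases assets with
    | nil => exact absurd rfl hpre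
    | cons a0 rest =>
      have hnm := pv_firstRoot_none root_paths (a0 :: rest) hfr
      have hm0 := hnm a0 (List.mem_cons_self ..)
      obtain ⟨t', hs⟩ := pv_sorted_head a0 rest
      rw [hs]
      simp only [pvAltGo, hm0, Bool.false_eq_true, if_false]
      rw [pv_altGo_fbest root_paths rest a0 (fun a ha => hnm a (List.mem_cons_of_mem _ ha))]
      simp [PySem.List.pyGet?, PySem.List.pyIdx?]
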